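-- pv_equiv track=rewrite | github.com/thmihnea/Algorithms | python/893-groups-of-special-equiv.py | get_equivalent
-- ===== SOURCE A (Python) =====
-- from collections import defaultdict
--
-- def get_equivalent(word) -> str:
--     even_table = defaultdict(int)
--     odd_table = defaultdict(int)
--     for i in range(0, len(word), 2):
--         even_table[word[i]] += 1
--     for i in range(1, len(word), 2):
--         odd_table[word[i]] += 1
--     result: str = ''
--     even_table = sorted(list(even_table.items()))
--     odd_table = sorted(list(odd_table.items()))
--     for entry in even_table:
--         result += f'{entry[0]}{entry[1]}'
--     for entry in odd_table:
--         result += f'{entry[0]}{entry[1]}'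
--     return result
-- ===== SOURCE B (Python) =====
-- def get_equivalent(word) -> str:
--     # sort-and-group: sort each parity slice, then run-length encode the sorted
--     # list with an index-free scan (no counting dict at all)
--     out = []
--     for chunk in (sorted(word[0::2]), sorted(word[1::2])):
--         while chunk:
--             c = chunk[0]
--             n = 1
--             while n < len(chunk) and chunk[n] == c:
--                 n += 1
--             out.append(c + str(n))
--             chunk = chunk[n:]
--     return ''.join(out)
-- ===== Notes on version B (the rewrite author's own statement) =====
-- stated objective: alternative
-- what changed: Replaces A's defaultdict counting over index ranges by sort-and-group: B slices the even/odd-position characters (word[0::2], word[1::2]), sorts each slice, and run-length encodes the sorted list with a linear scan, so no counting dict exists at all.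
import Mathlib
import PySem

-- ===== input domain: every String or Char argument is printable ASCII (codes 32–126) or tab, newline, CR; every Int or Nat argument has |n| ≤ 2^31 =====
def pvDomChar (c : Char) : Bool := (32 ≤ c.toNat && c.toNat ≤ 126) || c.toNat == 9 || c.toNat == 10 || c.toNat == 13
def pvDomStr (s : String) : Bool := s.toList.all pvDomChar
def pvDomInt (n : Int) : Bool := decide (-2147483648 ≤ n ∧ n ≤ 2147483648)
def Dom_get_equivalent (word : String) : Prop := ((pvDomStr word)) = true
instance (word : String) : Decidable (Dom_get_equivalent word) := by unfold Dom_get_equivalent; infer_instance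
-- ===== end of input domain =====

-- B replaces A's defaultdict counting by sort-and-group: it sorts each parity slice
-- (word[0::2], word[1::2]) and run-length encodes the sorted list with a scan.

-- ===== PORT A =====
-- strings are handled as char lists (PySem convention); word[i] is in range for every i
-- the range loops produce, so the total pyGetD (default never used) is exact here
def get_equivalent (word : String) : String :=
  let cs := word.toList
  let even_table := (PySem.List.pyRange 0 (cs.length : Int) 2).foldl
    (fun d i => d.modify (PySem.List.pyGetD cs i 'a') 0 (· + 1)) (PySem.Dict.empty : PySem.Dict Char Int)
  let odd_table := (PySem.List.pyRange 1 (cs.length : Int) 2).foldl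
    (fun d i => d.modify (PySem.List.pyGetD cs i 'a') 0 (· + 1)) (PySem.Dict.empty : PySem.Dict Char Int)
  let result : List Char := []
  let even_items := PySem.List.sorted2 even_table.items Prod.fst Prod.snd
  let odd_items := PySem.List.sorted2 odd_table.items Prod.fst Prod.snd
  let result := even_items.foldl (fun r e => r ++ ([e.1] ++ PySem.Int.toChars e.2)) result
  let result := odd_items.foldl (fun r e => r ++ ([e.1] ++ PySem.Int.toChars e.2)) result
  String.ofList result

-- ===== PORT B =====
-- the outer 'while chunk' emits one block per run; the inner 'while … chunk[n] == c'
-- counting equal neighbours is the takeWhile length; chunk = chunk[n:] is the drop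
def pvRle (chunk : List Char) : List String :=
  match chunk with
  | [] => []
  | c :: rest =>
    let k := (rest.takeWhile (· == c)).length
    String.ofList ([c] ++ PySem.Int.toChars ((1 + k : Nat) : Int)) :: pvRle (rest.drop k)
termination_by chunk.length
decreasing_by simp

-- word[0::2] / word[1::2]: the step 2 is never 0, so slice? always returns some and
-- getD's default is never used
def get_equivalent_alt (word : String) : String :=
  let cs := word.toList
  let evens := (PySem.List.slice? cs (some 0) none 2).getD []
  let odds := (PySem.List.slice? cs (some 1) none 2).getD []
  let out := [PySem.List.sorted evens (fun c => c) false,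
              PySem.List.sorted odds (fun c => c) false].foldl
    (fun out chunk => out ++ pvRle chunk) []
  PySem.Str.join "" out

-- ===== PRECONDITION & SPEC =====
def Spec_get_equivalent (word : String) (out : String) : Prop := out = get_equivalent_alt word
instance (word : String) (out : String) : Decidable (Spec_get_equivalent word out) := by unfold Spec_get_equivalent; infer_instance

-- ===== CLAIM (what is proved, stated in full; the proofs are below) =====
def Claim_equal_get_equivalent : Prop := ∀ (word : String), Dom_get_equivalent word → Spec_get_equivalent word (get_equivalent word)

-- ===== LEMMAS AND PROOFS =====

-- insertBy only looks at `before x y` for y already in the list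
lemma insertBy_congr {α : Type} (b1 b2 : α → α → Bool) (x : α) (ys : List α)
    (h : ∀ y ∈ ys, b1 x y = b2 x y) :
    PySem.List.insertBy b1 x ys = PySem.List.insertBy b2 x ys := by
  induction ys with
  | nil => rfl
  | cons y ys ih =>
    simp only [PySem.List.insertBy]
    rw [h y (by simp)]
    by_cases hb : b2 x y = true
    · simp [hb]
    · simp only [Bool.not_eq_true] at hb
      simp [hb, ih (fun z hz => h z (by simp [hz]))]

-- when the first keys of the elements are pairwise distinct, Python's tuple sort
-- (sorted2) coincides with the sort by the first key alone
lemma sorted2_eq_sorted_of_pairwise_ne {α κ₁ κ₂ : Type} [LinearOrder κ₁]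
    [LT κ₂] [DecidableLT κ₂] (xs : List α) (k1 : α → κ₁) (k2 : α → κ₂)
    (h : xs.Pairwise (fun a b => k1 a ≠ k1 b)) :
    PySem.List.sorted2 xs k1 k2 false = PySem.List.sorted xs k1 false := by
  have key : ∀ x y : α, k1 x ≠ k1 y →
      (decide (k1 x < k1 y) || (!decide (k1 y < k1 x) && decide (k2 x < k2 y)))
        = decide (k1 x < k1 y) := by
    intro x y hne
    rcases lt_or_gt_of_ne hne with hlt | hgt
    · simp [hlt]
    · simp [lt_asymm hgt, hgt]
  suffices H : ∀ (l acc : List α), l.Pairwise (fun a b => k1 a ≠ k1 b) →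
      (∀ x ∈ l, ∀ y ∈ acc, k1 x ≠ k1 y) →
      l.foldl (fun acc x => PySem.List.insertBy
          (fun a b => decide (k1 a < k1 b) || (!decide (k1 b < k1 a) && decide (k2 a < k2 b))) x acc) acc
        = l.foldl (fun acc x => PySem.List.insertBy (fun a b => decide (k1 a < k1 b)) x acc) acc by
    simpa [PySem.List.sorted2, PySem.List.sorted] using H xs [] h (by simp)
  intro l
  induction l with
  | nil => intro acc _ _; rfl
  | cons x t ih =>
    intro acc hp hd
    simp only [List.foldl_cons]
    rw [insertBy_congr
      (fun a b => decide (k1 a < k1 b) || (!decide (k1 b < k1 a) && decide (k2 a < k2 b)))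
      (fun a b => decide (k1 a < k1 b)) x acc (fun y hy => key x y (hd x (by simp) y hy))]
    refine ih _ hp.of_cons ?_
    intro z hz y hy
    rw [PySem.List.mem_insertBy] at hy
    rcases hy with rfl | hy
    · exact (List.rel_of_pairwise_cons hp hz).symm
    · exact hd z (by simp [hz]) y hy

-- ''.join(parts) concatenates
lemma join_nil_chars (ls : List (List Char)) : PySem.Chars.join [] ls = ls.flatten := by
  unfold PySem.Chars.join
  induction ls with
  | nil => rfl
  | cons a t ih =>
    cases t with
    | nil => simp [List.intercalate]
    | cons b t' => simp_all [List.intercalate, List.intersperse]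

-- the even/odd subsequences of cs, described by explicit index maps (proof-only)
def evSpec (cs : List Char) : List Char :=
  (List.range ((cs.length + 1) / 2)).map (fun k => cs.getD (2 * k) 'a')
def odSpec (cs : List Char) : List Char :=
  (List.range (cs.length / 2)).map (fun k => cs.getD (2 * k + 1) 'a')

-- the even-index loop of A reads exactly evSpec
lemma even_loop (cs : List Char) :
    (PySem.List.pyRange 0 (cs.length : Int) 2).map (fun i => PySem.List.pyGetD cs i 'a')
      = evSpec cs := by
  rw [PySem.List.pyRange_of_pos 0 (cs.length : Int) (by norm_num), List.map_map]
  unfold evSpec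
  have hc : (if (0:Int) < (cs.length : Int)
      then (((cs.length : Int) - 0 + 2 - 1) / 2).toNat else 0) = (cs.length + 1) / 2 := by
    split <;> omega
  rw [hc]
  apply List.map_congr_left
  intro k _
  have e1 : ((0:Int) + 2 * (k:Int)) = ((2 * k : Nat) : Int) := by push_cast; ring
  simp only [Function.comp_apply, e1, PySem.List.pyGetD_natCast]

-- the odd-index loop of A reads exactly odSpec
lemma odd_loop (cs : List Char) :
    (PySem.List.pyRange 1 (cs.length : Int) 2).map (fun i => PySem.List.pyGetD cs i 'a')
      = odSpec cs := by
  rw [PySem.List.pyRange_of_pos 1 (cs.length : Int) (by norm_num), List.map_map]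
  unfold odSpec
  have hc : (if (1:Int) < (cs.length : Int)
      then (((cs.length : Int) - 1 + 2 - 1) / 2).toNat else 0) = cs.length / 2 := by
    split <;> omega
  rw [hc]
  apply List.map_congr_left
  intro k _
  have e1 : ((1:Int) + 2 * (k:Int)) = ((2 * k + 1 : Nat) : Int) := by push_cast; ring
  simp only [Function.comp_apply, e1, PySem.List.pyGetD_natCast]

-- B's even slice word[0::2] is evSpec
lemma slice_step2_even (cs : List Char) :
    PySem.List.slice? cs (some 0) none 2 = some (evSpec cs) := by
  unfold PySem.List.slice? PySem.List.sliceIndices evSpec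
  norm_num
  have hc : (if 0 < cs.length then (((cs.length:Int) + 2 - 1) / 2).toNat else 0)
      = (cs.length + 1) / 2 := by split <;> omega
  rw [hc]
  rw [List.filterMap_eq_map_iff_forall_eq_some.2 ?_]
  intro k hk
  simp only [List.mem_range] at hk
  have h1 : ((2 * (k:Int)).toNat) = 2 * k := by omega
  have h2 : 2 * k < cs.length := by omega
  rw [h1, List.getElem?_eq_getElem h2]
  simp

-- B's odd slice word[1::2] is odSpec
lemma slice_step2_odd (cs : List Char) :
    PySem.List.slice? cs (some 1) none 2 = some (odSpec cs) := by
  unfold PySem.List.slice? PySem.List.sliceIndices odSpec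
  norm_num
  rcases Nat.eq_zero_or_pos cs.length with h0 | h0
  · simp [h0]
  · have hm : min (1:Int) (cs.length:Int) = 1 := by omega
    have hc : (if 1 < cs.length
        then (((cs.length:Int) - min 1 (cs.length:Int) + 2 - 1) / 2).toNat else 0)
        = cs.length / 2 := by rw [hm]; split <;> omega
    rw [hc, hm]
    rw [List.filterMap_eq_map_iff_forall_eq_some.2 ?_]
    intro k hk
    simp only [List.mem_range] at hk
    have h1 : (((1:Int) + 2 * (k:Int)).toNat) = 2 * k + 1 := by omega
    have h2 : 2 * k + 1 < cs.length := by omega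
    rw [h1, List.getElem?_eq_getElem h2]
    simp

-- in a sorted list whose elements dominate c, everything after the leading run of c's
-- is strictly greater than c
lemma run_tail_gt (c : Char) (rest : List Char) (hp : rest.Pairwise (· ≤ ·))
    (hle : ∀ x ∈ rest, c ≤ x) : ∀ x ∈ rest.dropWhile (· == c), c < x := by
  induction rest with
  | nil => simp
  | cons a r ih =>
    rw [List.dropWhile_cons]
    by_cases hac : a = c
    · subst hac
      simp only [beq_self_eq_true, if_true]
      exact ih hp.of_cons (fun x hx => List.rel_of_pairwise_cons hp hx)
    · rw [if_neg (by simp [hac])]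
      intro x hx
      have hca : c < a := lt_of_le_of_ne (hle a (by simp)) (Ne.symm hac)
      rcases List.mem_cons.1 hx with rfl | hx'
      · exact hca
      · exact lt_of_lt_of_le hca (List.rel_of_pairwise_cons hp hx')

-- the run-length scan of a sorted chunk emits each distinct character with its count
lemma rle_chars (l : List Char) (h : l.Pairwise (· ≤ ·)) :
    ((pvRle l).map String.toList).flatten
      = (PySem.List.sorted (PySem.Set.ofList l) (fun c => c) false).flatMap
          (fun c => [c] ++ PySem.Int.toChars (PySem.List.count l c)) := by
  suffices H : ∀ (n : Nat) (l : List Char), l.length ≤ n → l.Pairwise (· ≤ ·) →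
      ((pvRle l).map String.toList).flatten
        = (PySem.List.sorted (PySem.Set.ofList l) (fun c => c) false).flatMap
            (fun c => [c] ++ PySem.Int.toChars (PySem.List.count l c)) from
    H l.length l le_rfl h
  intro n
  induction n with
  | zero =>
    intro l hl _
    have : l = [] := List.eq_nil_of_length_eq_zero (Nat.le_zero.1 hl)
    subst this; simp [pvRle]
  | succ n ih =>
    intro l hl hp
    match l with
    | [] => simp [pvRle]
    | c :: rest =>
      have hle : ∀ x ∈ rest, c ≤ x := fun x hx => List.rel_of_pairwise_cons hp hx
      have hgt := run_tail_gt c rest hp.of_cons hle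
      have hrest : rest.takeWhile (· == c) ++ rest.dropWhile (· == c) = rest :=
        List.takeWhile_append_dropWhile
      have hdrop : rest.drop (rest.takeWhile (· == c)).length = rest.dropWhile (· == c) := by
        have h2 := List.drop_left (l₁ := rest.takeWhile (· == c)) (l₂ := rest.dropWhile (· == c))
        rwa [hrest] at h2
      have htc : ∀ x ∈ rest.takeWhile (· == c), x = c :=
        fun x hx => by simpa using List.mem_takeWhile_imp hx
      have htrep : rest.takeWhile (· == c)
          = List.replicate (rest.takeWhile (· == c)).length c :=
        List.eq_replicate_of_mem htc
      have hmem : ∀ x, x ∈ (c :: rest) ↔ x = c ∨ x ∈ rest.dropWhile (· == c) := by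
        intro x
        constructor
        · intro hx
          rcases List.mem_cons.1 hx with rfl | hx'
          · exact Or.inl rfl
          · rw [← hrest] at hx'
            rcases List.mem_append.1 hx' with h1 | h2
            · exact Or.inl (htc x h1)
            · exact Or.inr h2
        · intro hx
          rcases hx with rfl | hx'
          · simp
          · rw [← hrest]
            exact List.mem_cons_of_mem _ (List.mem_append_right _ hx')
      have hcnotd : c ∉ rest.dropWhile (· == c) := fun hc => lt_irrefl c (hgt c hc)
      have hk : List.count c rest = (rest.takeWhile (· == c)).length := by
        conv_lhs => rw [← hrest]
        rw [List.count_append, List.count_eq_zero.2 hcnotd]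
        conv_lhs => rw [htrep]
        rw [List.count_replicate_self]
        omega
      have hcount_c : List.count c (c :: rest) = 1 + (rest.takeWhile (· == c)).length := by
        rw [List.count_cons_self, hk]
        omega
      have hcount_d : ∀ x ∈ rest.dropWhile (· == c),
          List.count x (c :: rest) = List.count x (rest.dropWhile (· == c)) := by
        intro x hx
        have hxc : x ≠ c := ne_of_gt (hgt x hx)
        rw [← hrest]
        conv_lhs => rw [htrep]
        simp [List.count_append, List.count_replicate, Ne.symm hxc]
      have hnodup_sd : (PySem.List.sorted (PySem.Set.ofList (rest.dropWhile (· == c)))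
          (fun x => x) false).Nodup :=
        ((PySem.List.sorted_perm _ _ _).nodup_iff).2 (PySem.Set.nodup_ofList _)
      have hmem_sd : ∀ x, x ∈ PySem.List.sorted (PySem.Set.ofList (rest.dropWhile (· == c)))
          (fun x => x) false ↔ x ∈ rest.dropWhile (· == c) := by
        intro x
        rw [PySem.List.mem_sorted, PySem.Set.mem_ofList]
      have hset : PySem.List.sorted (PySem.Set.ofList (c :: rest)) (fun x => x) false
          = c :: PySem.List.sorted (PySem.Set.ofList (rest.dropWhile (· == c))) (fun x => x) false := by
        apply PySem.List.sorted_eq_of_perm_of_pairwise_lt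
        · apply (List.perm_ext_iff_of_nodup ?_ (PySem.Set.nodup_ofList _)).2
          · intro x
            rw [List.mem_cons, hmem_sd, PySem.Set.mem_ofList, hmem]
          · exact List.nodup_cons.2 ⟨fun hc => hcnotd ((hmem_sd c).1 hc), hnodup_sd⟩
        · exact List.Pairwise.cons (fun y hy => hgt y ((hmem_sd y).1 hy))
            (PySem.List.sorted_ofList_pairwise_lt _)
      have hdlen : (rest.dropWhile (· == c)).length ≤ n := by
        have := List.length_dropWhile_le (· == c) rest
        simp only [List.length_cons] at hl
        omega
      have hdpair : (rest.dropWhile (· == c)).Pairwise (· ≤ ·) :=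
        List.Pairwise.sublist (List.dropWhile_sublist _) hp.of_cons
      rw [pvRle, hset, List.flatMap_cons]
      simp only [hdrop, List.map_cons, List.flatten_cons, String.toList_ofList]
      rw [ih _ hdlen hdpair]
      congr 1
      · have harg : ((1 + (rest.takeWhile (· == c)).length : Nat) : Int)
            = ((PySem.List.count (c :: rest) c : Nat) : Int) := by
          rw [PySem.List.count_eq, hcount_c]
        rw [harg]
      · simp only [List.flatMap_def]
        apply congrArg List.flatten
        apply List.map_congr_left
        intro x hx
        rw [PySem.List.count_eq, PySem.List.count_eq, hcount_d x ((hmem_sd x).1 hx)]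

-- per chunk: A's sorted counter items yield the sorted-distinct-with-count block
lemma chunk_block (cs0 : List Char) :
    (PySem.List.sorted2 (PySem.Dict.counter cs0).items Prod.fst Prod.snd false).flatMap
        (fun e => [e.1] ++ PySem.Int.toChars e.2)
      = (PySem.List.sorted (PySem.Set.ofList cs0) (fun c => c) false).flatMap
          (fun c => [c] ++ PySem.Int.toChars (PySem.List.count cs0 c)) := by
  rw [PySem.Dict.items_counter]
  have hp : ((PySem.Set.ofList cs0).map
      (fun k => (k, (List.count k cs0 : Int)))).Pairwise (fun a b => a.1 ≠ b.1) := by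
    refine List.Pairwise.map _ (fun a b hab => ?_) (PySem.Set.nodup_ofList cs0)
    simpa using hab
  rw [sorted2_eq_sorted_of_pairwise_ne _ _ _ hp]
  have hsorted : PySem.List.sorted
      ((PySem.Set.ofList cs0).map (fun k => (k, (List.count k cs0 : Int)))) Prod.fst false
      = (PySem.List.sorted (PySem.Set.ofList cs0) (fun c => c) false).map
          (fun k => (k, (List.count k cs0 : Int))) := by
    apply PySem.List.sorted_eq_of_perm_of_pairwise_lt
    · exact (PySem.List.sorted_perm (PySem.Set.ofList cs0) (fun c => c) false).map _
    · refine List.Pairwise.map _ (fun a b hab => ?_) (PySem.List.sorted_ofList_pairwise_lt cs0)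
      simpa using hab
  rw [hsorted, List.flatMap_map]
  simp [PySem.List.count_eq]

-- the sort-and-group of a chunk equals A's per-chunk block (combines the two above)
lemma chunk_b (chunk : List Char) :
    ((pvRle (PySem.List.sorted chunk (fun c => c) false)).map String.toList).flatten
      = (PySem.List.sorted (PySem.Set.ofList chunk) (fun c => c) false).flatMap
          (fun c => [c] ++ PySem.Int.toChars (PySem.List.count chunk c)) := by
  have hperm := PySem.List.sorted_perm chunk (fun c => c) false
  rw [rle_chars _ (PySem.List.sorted_pairwise chunk (fun c => c))]
  have hset : PySem.List.sorted
      (PySem.Set.ofList (PySem.List.sorted chunk (fun c => c) false)) (fun c => c) false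
      = PySem.List.sorted (PySem.Set.ofList chunk) (fun c => c) false := by
    apply PySem.List.sorted_eq_sorted_of_perm _ _ _ (fun a b hab => hab)
    refine (List.perm_ext_iff_of_nodup (PySem.Set.nodup_ofList _) (PySem.Set.nodup_ofList _)).2 ?_
    intro x
    rw [PySem.Set.mem_ofList, PySem.Set.mem_ofList, hperm.mem_iff]
  rw [hset]
  simp only [List.flatMap_def]
  apply congrArg List.flatten
  apply List.map_congr_left
  intro c _
  simp [PySem.List.count_eq, hperm.count_eq]

-- ===== VERDICT (by name: the statement is the Claim_ definition above) =====
theorem get_equivalent_spec : Claim_equal_get_equivalent := by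
  intro word _
  unfold Spec_get_equivalent get_equivalent get_equivalent_alt
  have hfold : ∀ (r : List Int),
      r.foldl (fun d i => PySem.Dict.modify d (PySem.List.pyGetD word.toList i 'a') 0 (· + 1))
          (PySem.Dict.empty : PySem.Dict Char Int)
        = PySem.Dict.counter (r.map (fun i => PySem.List.pyGetD word.toList i 'a')) := by
    intro r
    rw [PySem.Dict.counter_eq_foldl, List.foldl_map]
  simp only [hfold, even_loop, odd_loop, slice_step2_even, slice_step2_odd, Option.getD_some,
    PySem.List.foldl_append_eq_flatMap, chunk_block,
    List.foldl_cons, List.foldl_nil, List.nil_append]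
  have he : ("".toList) = ([] : List Char) := rfl
  simp only [PySem.Str.join, he, List.map_append]
  rw [join_nil_chars, List.flatten_append, chunk_b, chunk_b]
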